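-- pv_equiv track=rewrite | github.com/MedvedevSA/fastapi-dijkstra | djikstra.py | prepare_graph
-- ===== SOURCE A (Python) =====
-- def prepare_graph(graph: dict[str, list[dict[str, dict]]], key: str):
--     new_graph = {}
--     for node, vertexes in graph.items():
--         new_graph[node] = {}
--
--         for connected_node, weights in vertexes:
--             if connected_node not in new_graph[node]:
--                 new_graph[node][connected_node] = weights
--
--             if weights[key] < new_graph[node][connected_node][key]:
--                 new_graph[node][connected_node] = weights
--
--     return new_graph
-- ===== SOURCE B (Python) =====
-- def prepare_graph(graph: dict[str, list[dict[str, dict]]], key: str):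
--     new_graph = {}
--     for node, vertexes in graph.items():
--         # phase 1: group all candidate weight-dicts by connected node, in encounter order
--         groups = {}
--         for connected_node, weights in vertexes:
--             groups.setdefault(connected_node, []).append(weights)
--         # phase 2: reduce each group to its first minimal-weight entry
--         new_graph[node] = {cn: min(group, key=lambda w: w[key])
--                            for cn, group in groups.items()}
--     return new_graph
-- ===== Notes on version B (the rewrite author's own statement) =====
-- stated objective: alternative
-- what changed: A keeps a running minimum edge per node pair while scanning; B first groups all candidate weight-dicts per connected node and then reduces each group with min(group, key=...), a separate build-then-reduce pass.
import Mathlib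
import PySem

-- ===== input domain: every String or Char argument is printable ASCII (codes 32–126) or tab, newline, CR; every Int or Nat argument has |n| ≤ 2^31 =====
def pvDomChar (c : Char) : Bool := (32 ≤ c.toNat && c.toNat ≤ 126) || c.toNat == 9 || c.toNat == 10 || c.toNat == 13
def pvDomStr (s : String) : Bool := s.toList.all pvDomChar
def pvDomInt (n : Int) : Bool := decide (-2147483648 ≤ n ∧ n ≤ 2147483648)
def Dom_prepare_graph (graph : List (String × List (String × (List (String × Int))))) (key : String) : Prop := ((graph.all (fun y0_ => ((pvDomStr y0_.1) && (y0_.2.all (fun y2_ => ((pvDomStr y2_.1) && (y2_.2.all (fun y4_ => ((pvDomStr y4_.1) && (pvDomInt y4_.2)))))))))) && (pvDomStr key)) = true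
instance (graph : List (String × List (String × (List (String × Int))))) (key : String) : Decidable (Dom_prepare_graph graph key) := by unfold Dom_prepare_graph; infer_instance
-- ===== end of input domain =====

-- B replaces A's in-place running-minimum update by a two-phase build: group the candidate
-- weight-dicts per connected node, then reduce each group with first-minimal min (objective: alternative).

-- a weights argument is a Python dict passed as an association list: normalize it (last value wins,
-- first position kept), exactly what dict(pairs) does
def pvWOf (l : List (String × Int)) : PySem.Dict String Int := PySem.Dict.ofList l

-- ===== PORT A =====
-- one step of A's inner loop: ensure the pair is present, then overwrite on strictly smaller weight
def pvStepA (key : String) (d : PySem.Dict String (PySem.Dict String Int))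
    (q : String × List (String × Int)) : PySem.Dict String (PySem.Dict String Int) :=
  let w := pvWOf q.2
  let d1 := if d.contains q.1 then d else d.insert q.1 w
  if w.getD key 0 < (d1.getD q.1 PySem.Dict.empty).getD key 0 then d1.insert q.1 w else d1

def prepare_graph (graph : List (String × List (String × (List (String × Int))))) (key : String) : List (String × List (String × List (String × Int))) :=
  (graph.foldl (fun ng p => ng.insert p.1 (p.2.foldl (pvStepA key) PySem.Dict.empty))
      PySem.Dict.empty).items.map (fun r => (r.1, r.2.items.map (fun s => (s.1, s.2.items))))

-- ===== PORT B =====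
-- phase 1 step: groups.setdefault(cn, []).append(weights)
def pvStepB (g : PySem.Dict String (List (PySem.Dict String Int)))
    (q : String × List (String × Int)) : PySem.Dict String (List (PySem.Dict String Int)) :=
  g.modify q.1 [] (· ++ [pvWOf q.2])

-- one node of B: group, then reduce each group with min(group, key=lambda w: w[key])
def pvNodeB (key : String) (vs : List (String × List (String × Int))) :
    List (String × List (String × Int)) :=
  ((vs.foldl pvStepB PySem.Dict.empty).items).map
    (fun r => (r.1, ((PySem.List.min? r.2 (fun w => w.getD key 0)).getD PySem.Dict.empty).items))

def prepare_graph_alt (graph : List (String × List (String × (List (String × Int))))) (key : String) : List (String × List (String × List (String × Int))) :=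
  (graph.foldl (fun ng p => ng.insert p.1 (pvNodeB key p.2)) PySem.Dict.empty).items

-- ===== PRECONDITION & SPEC =====
-- Pre_ excludes exactly the inputs on which Python A raises KeyError: some weights dict lacking `key`
def Pre_prepare_graph (graph : List (String × List (String × (List (String × Int))))) (key : String) : Prop :=
  ∀ p ∈ graph, ∀ q ∈ p.2, key ∈ q.2.map Prod.fst
instance (graph : List (String × List (String × (List (String × Int))))) (key : String) : Decidable (Pre_prepare_graph graph key) := by unfold Pre_prepare_graph; infer_instance

def pvWitness_prepare_graph : (List (String × List (String × (List (String × Int))))) × String :=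
  ([("a", [("b", [("k", 2)]), ("b", [("k", 1)]), ("c", [("k", 5)])]), ("b", [])], "k")

def Spec_prepare_graph (graph : List (String × List (String × (List (String × Int))))) (key : String) (out : List (String × List (String × List (String × Int)))) : Prop := out = prepare_graph_alt graph key
instance (graph : List (String × List (String × (List (String × Int))))) (key : String) (out : List (String × List (String × List (String × Int)))) : Decidable (Spec_prepare_graph graph key out) := by unfold Spec_prepare_graph; infer_instance

-- ===== CLAIM (what is proved, stated in full; the proofs are below) =====
def Claim_equal_prepare_graph : Prop := ∀ (graph : List (String × List (String × (List (String × Int))))) (key : String), Dom_prepare_graph graph key → Pre_prepare_graph graph key → Spec_prepare_graph graph key (prepare_graph graph key)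

-- ===== LEMMAS AND PROOFS =====

-- value map on items lists, fixing the keys
def pvVMap {ν ν' : Type} (f : ν → ν') (l : List (String × ν)) : List (String × ν') :=
  l.map (fun r => (r.1, f r.2))

theorem pvContains_map {ν ν' : Type} (f : ν → ν') (dA : PySem.Dict String ν)
    (dB : PySem.Dict String ν') (h : dB.items = pvVMap f dA.items) (k : String) :
    dB.contains k = dA.contains k := by
  simp [PySem.Dict.contains, h, pvVMap, List.any_map, Function.comp_def]

theorem pvGet?_map {ν ν' : Type} (f : ν → ν') (dA : PySem.Dict String ν)
    (dB : PySem.Dict String ν') (h : dB.items = pvVMap f dA.items) (k : String) :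
    dB.get? k = (dA.get? k).map f := by
  simp [PySem.Dict.get?, h, pvVMap, List.find?_map, Function.comp_def]

theorem pvInsert_map {ν ν' : Type} (f : ν → ν') (dA : PySem.Dict String ν)
    (dB : PySem.Dict String ν') (h : dB.items = pvVMap f dA.items) (k : String) (v : ν) :
    (dB.insert k (f v)).items = pvVMap f ((dA.insert k v).items) := by
  simp only [PySem.Dict.insert, pvContains_map f dA dB h k]
  by_cases hc : dA.contains k = true
  · simp only [hc, if_pos, h, pvVMap, List.map_map]
    apply List.map_congr_left
    intro p _
    by_cases hk : (p.1 == k) = true <;> simp [hk, Function.comp]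
  · simp [hc, h, pvVMap]

-- the reduction done by B's phase 2, and the compatibility map of the inner-dict relation
def pvMred (key : String) (grp : List (PySem.Dict String Int)) : PySem.Dict String Int :=
  (PySem.List.min? grp (fun w => w.getD key 0)).getD PySem.Dict.empty

def pvF (key : String) : List (PySem.Dict String Int) → PySem.Dict String Int := pvMred key

-- first-minimal min over a group extended on the right = A's strict-< running update
theorem pvMred_append (key : String) (grp : List (PySem.Dict String Int))
    (w : PySem.Dict String Int) (hne : grp ≠ []) :
    pvMred key (grp ++ [w]) =
      if w.getD key 0 < (pvMred key grp).getD key 0 then w else pvMred key grp := by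
  obtain ⟨m, hm⟩ : ∃ m, PySem.List.min? grp (fun w => w.getD key 0) = some m := by
    cases hmin : PySem.List.min? grp (fun w => w.getD key 0) with
    | none => exact absurd ((PySem.List.min?_eq_none_iff _ _).mp hmin) hne
    | some m => exact ⟨m, rfl⟩
  have hstep : PySem.List.min? (grp ++ [w]) (fun v => v.getD key 0) =
      if w.getD key 0 < m.getD key 0 then some w else some m := by
    simp only [PySem.List.min?] at hm ⊢
    rw [List.foldl_append, hm]
    simp only [List.foldl_cons, List.foldl_nil]
  unfold pvMred
  rw [hstep, hm]
  by_cases h : w.getD key 0 < m.getD key 0 <;> simp [h]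

-- invariant tying A's running-minimum dict to B's groups dict
def pvInv (key : String) (d : PySem.Dict String (PySem.Dict String Int))
    (g : PySem.Dict String (List (PySem.Dict String Int))) : Prop :=
  d.items = pvVMap (pvF key) g.items ∧ (∀ r ∈ g.items, r.2 ≠ []) ∧ g.keys.Nodup

theorem pvInv_step (key : String) (d : PySem.Dict String (PySem.Dict String Int))
    (g : PySem.Dict String (List (PySem.Dict String Int)))
    (h : pvInv key d g) (q : String × List (String × Int)) :
    pvInv key (pvStepA key d q) (pvStepB g q) := by
  obtain ⟨hit, hne, hnd⟩ := h
  have hc : d.contains q.1 = g.contains q.1 := pvContains_map (pvF key) g d hit q.1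
  by_cases hgc : g.contains q.1 = true
  · -- the pair is already present: A compares with its stored minimum
    obtain ⟨grp, hget⟩ : ∃ grp, g.get? q.1 = some grp := by
      rcases hv : g.get? q.1 with _ | grp
      · rw [PySem.Dict.contains_eq_isSome_get?, hv] at hgc; simp at hgc
      · exact ⟨grp, rfl⟩
    have hgrpmem : (q.1, grp) ∈ g.items := PySem.Dict.mem_items_of_get?_eq_some g hget
    have hgrpne : grp ≠ [] := hne _ hgrpmem
    have hdget : d.get? q.1 = some (pvMred key grp) := by
      rw [pvGet?_map (pvF key) g d hit q.1, hget]; rfl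
    have hdc : d.contains q.1 = true := by rw [hc]; exact hgc
    have hdgd : d.getD q.1 PySem.Dict.empty = pvMred key grp :=
      PySem.Dict.getD_of_get?_eq_some d PySem.Dict.empty hdget
    have hggd : g.getD q.1 [] = grp := PySem.Dict.getD_of_get?_eq_some g [] hget
    have hB : pvStepB g q = g.insert q.1 (grp ++ [pvWOf q.2]) := by
      simp [pvStepB, PySem.Dict.modify, hggd]
    refine ⟨?_, ?_, ?_⟩
    · -- items relation
      rw [hB]
      have hmr : pvF key (grp ++ [pvWOf q.2]) =
          if (pvWOf q.2).getD key 0 < (pvMred key grp).getD key 0 then pvWOf q.2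
          else pvMred key grp := pvMred_append key grp (pvWOf q.2) hgrpne
      by_cases hlt : (pvWOf q.2).getD key 0 < (pvMred key grp).getD key 0
      · have : pvStepA key d q = d.insert q.1 (pvWOf q.2) := by
          simp [pvStepA, hdc, hdgd, hlt]
        rw [this]
        have := pvInsert_map (pvF key) g d hit q.1 (grp ++ [pvWOf q.2])
        rw [hmr, if_pos hlt] at this
        exact this
      · have : pvStepA key d q = d := by
          simp [pvStepA, hdc, hdgd, hlt]
        rw [this]
        have h2 := pvInsert_map (pvF key) g d hit q.1 (grp ++ [pvWOf q.2])
        rw [hmr, if_neg hlt] at h2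
        -- d.insert q.1 (pvMred key grp) = d since that is exactly d's stored value
        have hins : d.insert q.1 (pvMred key grp) = d := by
          apply PySem.Dict.ext
          simp only [PySem.Dict.insert, hdc, if_pos]
          conv_rhs => rw [← List.map_id d.items]
          apply List.map_congr_left
          intro p hp
          by_cases hk : (p.1 == q.1) = true
          · have hk' : p.1 = q.1 := by simpa using hk
            have hndd : d.keys.Nodup := by
              simp only [PySem.Dict.keys, hit, pvVMap, List.map_map]
              simpa [PySem.Dict.keys, Function.comp] using hnd
            have := PySem.Dict.get?_of_mem_items (d := d) (k := p.1) (v := p.2)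
              hp hndd
            rw [hk'] at this
            rw [hdget] at this
            have h3 : pvMred key grp = p.2 := Option.some_inj.mp this
            simp only [hk, if_pos]
            rw [Prod.ext_iff]
            exact ⟨hk'.symm, h3⟩
          · simp [hk]
        rw [hins] at h2
        exact h2
    · -- groups stay nonempty
      intro r hr
      rw [hB] at hr
      rcases (PySem.Dict.mem_items_insert _ _ _ _).mp hr with hre | ⟨hrm, _⟩
      · rw [hre]; simp
      · exact hne _ hrm
    · rw [hB]; exact PySem.Dict.nodup_keys_insert _ _ _ hnd
  · -- fresh pair: both sides append
    have hgc' : g.contains q.1 = false := by simpa using hgc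
    have hdc : d.contains q.1 = false := by rw [hc]; exact hgc'
    have hggd : g.getD q.1 [] = [] := PySem.Dict.getD_of_not_contains g [] hgc'
    have hB : pvStepB g q = g.insert q.1 [pvWOf q.2] := by
      simp [pvStepB, PySem.Dict.modify, hggd]
    have hAstep : pvStepA key d q = d.insert q.1 (pvWOf q.2) := by
      simp [pvStepA, hdc, PySem.Dict.getD_insert_self]
    refine ⟨?_, ?_, ?_⟩
    · rw [hB, hAstep]
      have := pvInsert_map (pvF key) g d hit q.1 [pvWOf q.2]
      have hone : pvF key [pvWOf q.2] = pvWOf q.2 := by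
        simp [pvF, pvMred, PySem.List.min?]
      rw [hone] at this
      exact this
    · intro r hr
      rw [hB] at hr
      rcases (PySem.Dict.mem_items_insert _ _ _ _).mp hr with hre | ⟨hrm, _⟩
      · rw [hre]; simp
      · exact hne _ hrm
    · rw [hB]; exact PySem.Dict.nodup_keys_insert _ _ _ hnd

theorem pvInv_foldl (key : String) (vs : List (String × List (String × Int)))
    (d : PySem.Dict String (PySem.Dict String Int))
    (g : PySem.Dict String (List (PySem.Dict String Int))) (h : pvInv key d g) :
    pvInv key (vs.foldl (pvStepA key) d) (vs.foldl pvStepB g) := by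
  induction vs generalizing d g with
  | nil => exact h
  | cons q vs ih => exact ih _ _ (pvInv_step key d g h q)

-- one node: A's inner loop, flattened to items, equals B's group-then-reduce pass
theorem pvNode_eq (key : String) (vs : List (String × List (String × Int))) :
    (vs.foldl (pvStepA key) PySem.Dict.empty).items.map (fun s => (s.1, s.2.items)) =
      pvNodeB key vs := by
  have hinv : pvInv key (PySem.Dict.empty) (PySem.Dict.empty (κ := String) (ν := List (PySem.Dict String Int))) := by
    refine ⟨?_, ?_, ?_⟩ <;> simp [pvVMap, PySem.Dict.empty, PySem.Dict.keys]
  obtain ⟨hit, _, _⟩ := pvInv_foldl key vs _ _ hinv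
  rw [hit]
  simp [pvNodeB, pvVMap, List.map_map, Function.comp_def, pvF, pvMred]

-- outer loop: the two node-indexed dicts stay related
theorem pvOuter (key : String) (graph : List (String × List (String × (List (String × Int)))))
    (ngA : PySem.Dict String (PySem.Dict String (PySem.Dict String Int)))
    (ngB : PySem.Dict String (List (String × List (String × Int))))
    (h : ngB.items = pvVMap (fun d => d.items.map (fun s => (s.1, s.2.items))) ngA.items) :
    (graph.foldl (fun ng p => ng.insert p.1 (pvNodeB key p.2)) ngB).items =
      pvVMap (fun d => d.items.map (fun s => (s.1, s.2.items)))
        ((graph.foldl (fun ng p => ng.insert p.1 (p.2.foldl (pvStepA key) PySem.Dict.empty)) ngA).items) := by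
  induction graph generalizing ngA ngB with
  | nil => exact h
  | cons p graph ih =>
    simp only [List.foldl_cons]
    apply ih
    have := pvInsert_map (fun d => d.items.map (fun s => (s.1, s.2.items))) ngA ngB h p.1
      (p.2.foldl (pvStepA key) PySem.Dict.empty)
    rw [pvNode_eq key p.2] at this
    exact this

-- ===== VERDICT (by name: the statement is the Claim_ definition above) =====
theorem prepare_graph_spec : Claim_equal_prepare_graph := by
  intro graph key _ _
  unfold Spec_prepare_graph prepare_graph prepare_graph_alt
  rw [pvOuter key graph PySem.Dict.empty PySem.Dict.empty (by simp [pvVMap, PySem.Dict.empty])]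
  rfl
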